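-- pv_equiv track=rewrite | github.com/ruoneo/GGANDTI | src/p4_GAN/utils.py | search_position
-- ===== SOURCE A (Python) =====
-- def search_position(line):
--     position = {
--         'auroc_start': None,
--         'auroc_end': None,
--         'auprc_start': None,
--         'auprc_end': None
--     }
--     length = len(line)
--     for ch, index in zip(line, range(length)):
--         if ch == 'o':
--             position['auroc_start'] = index + 3
--         if ch == ',':
--             position['auroc_end'] = index
--         if ch == 'p':
--             position['auprc_start'] = index + 4
--     return position
-- ===== SOURCE B (Python) =====
-- def search_position(line):
--     o = line.rfind('o')
--     c = line.rfind(',')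
--     p = line.rfind('p')
--     return {
--         'auroc_start': o + 3 if o != -1 else None,
--         'auroc_end': c if c != -1 else None,
--         'auprc_start': p + 4 if p != -1 else None,
--         'auprc_end': None,
--     }
-- ===== Notes on version B (the rewrite author's own statement) =====
-- stated objective: idiomatic
-- what changed: The single forward indexed loop that repeatedly overwrites dict entries is replaced by three independent str.rfind backward searches, one per marker character, feeding a dict literal.
import Mathlib
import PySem

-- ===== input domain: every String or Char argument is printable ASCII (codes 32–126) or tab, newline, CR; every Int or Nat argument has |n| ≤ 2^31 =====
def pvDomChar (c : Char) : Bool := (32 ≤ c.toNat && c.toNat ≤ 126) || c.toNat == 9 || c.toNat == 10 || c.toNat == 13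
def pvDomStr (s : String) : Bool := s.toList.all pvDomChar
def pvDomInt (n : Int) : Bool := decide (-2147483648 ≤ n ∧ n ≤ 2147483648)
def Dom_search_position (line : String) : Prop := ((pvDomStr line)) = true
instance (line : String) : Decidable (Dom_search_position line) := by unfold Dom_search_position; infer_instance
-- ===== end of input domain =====

-- B replaces A's single forward indexed loop by three independent rfind backward searches (idiomatic); same return value.


-- ===== PORT A =====
def search_position (line : String) : List (String × Option Int) :=
  let position : PySem.Dict String (Option Int) :=
    ((((PySem.Dict.empty.insert "auroc_start" none).insert "auroc_end" none).insert
        "auprc_start" none).insert "auprc_end" none)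
  let final :=
    (line.toList.zipIdx).foldl
      (fun d (p : Char × Nat) =>
        let d := if p.1 = 'o' then d.insert "auroc_start" (some ((p.2 : Int) + 3)) else d
        let d := if p.1 = ',' then d.insert "auroc_end" (some ((p.2 : Int))) else d
        if p.1 = 'p' then d.insert "auprc_start" (some ((p.2 : Int) + 4)) else d)
      position
  final.items

-- ===== PORT B =====
def search_position_alt (line : String) : List (String × Option Int) :=
  let o := PySem.Str.rfind line "o"
  let c := PySem.Str.rfind line ","
  let p := PySem.Str.rfind line "p"
  [("auroc_start", if o ≠ -1 then some (o + 3) else none),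
   ("auroc_end", if c ≠ -1 then some c else none),
   ("auprc_start", if p ≠ -1 then some (p + 4) else none),
   ("auprc_end", none)]

-- ===== PRECONDITION & SPEC =====
def Spec_search_position (line : String) (out : List (String × Option Int)) : Prop := out = search_position_alt line
instance (line : String) (out : List (String × Option Int)) : Decidable (Spec_search_position line out) := by unfold Spec_search_position; infer_instance

-- ===== CLAIM (what is proved, stated in full; the proofs are below) =====
def Claim_equal_search_position : Prop := ∀ (line : String), Dom_search_position line → Spec_search_position line (search_position line)

-- ===== LEMMAS AND PROOFS =====

/-- last index of `ch` in `cs`, counted from the front. -/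
def lastIdx : List Char → Char → Option Nat
  | [], _ => none
  | x :: xs, ch =>
    match lastIdx xs ch with
    | some j => some (j + 1)
    | none => if x = ch then some 0 else none

theorem lastIdx_nil (ch : Char) : lastIdx [] ch = none := rfl

theorem lastIdx_cons (x : Char) (xs : List Char) (ch : Char) :
    lastIdx (x :: xs) ch =
      (match lastIdx xs ch with
       | some j => some (j + 1)
       | none => if x = ch then some 0 else none) := rfl

/-- the four-key dict A maintains, abstracted over the three mutable values. -/
def mkD (a b c : Option Int) : PySem.Dict String (Option Int) :=
  PySem.Dict.mk [("auroc_start", a), ("auroc_end", b), ("auprc_start", c), ("auprc_end", none)]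

theorem insert_mkD_o (a b c v) : (mkD a b c).insert "auroc_start" v = mkD v b c := by
  simp [mkD, PySem.Dict.insert]

theorem insert_mkD_c (a b c v) : (mkD a b c).insert "auroc_end" v = mkD a v c := by
  simp [mkD, PySem.Dict.insert]

theorem insert_mkD_p (a b c v) : (mkD a b c).insert "auprc_start" v = mkD a b v := by
  simp [mkD, PySem.Dict.insert]

def oUp (cs : List Char) (ch : Char) (i : Nat) (off : Int) (a : Option Int) : Option Int :=
  match lastIdx cs ch with
  | none => a
  | some j => some (((i + j : Nat) : Int) + off)

theorem oUp_cons (x : Char) (xs : List Char) (ch : Char) (i : Nat) (off : Int) (a : Option Int) :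
    oUp (x :: xs) ch i off a
      = oUp xs ch (i + 1) off (if x = ch then some ((i : Int) + off) else a) := by
  rcases h : lastIdx xs ch with _ | j
  · by_cases hx : x = ch
    · simp [oUp, lastIdx_cons, h, hx]
    · simp [oUp, lastIdx_cons, h, hx]
  · simp only [oUp, lastIdx_cons, h]
    congr 1
    push_cast
    ring

theorem foldA (cs : List Char) : ∀ (i : Nat) (a b c : Option Int),
    ((cs.zipIdx i).foldl
      (fun d (p : Char × Nat) =>
        let d := if p.1 = 'o' then d.insert "auroc_start" (some ((p.2 : Int) + 3)) else d
        let d := if p.1 = ',' then d.insert "auroc_end" (some ((p.2 : Int))) else d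
        if p.1 = 'p' then d.insert "auprc_start" (some ((p.2 : Int) + 4)) else d)
      (mkD a b c))
    = mkD (oUp cs 'o' i 3 a) (oUp cs ',' i 0 b) (oUp cs 'p' i 4 c) := by
  induction cs with
  | nil => intro i a b c; simp [oUp, lastIdx]
  | cons x xs ih =>
    intro i a b c
    simp only [List.zipIdx_cons, List.foldl_cons]
    have step : (let d := if x = 'o' then (mkD a b c).insert "auroc_start" (some ((i : Int) + 3)) else mkD a b c
                 let d := if x = ',' then d.insert "auroc_end" (some ((i : Int))) else d
                 if x = 'p' then d.insert "auprc_start" (some ((i : Int) + 4)) else d)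
        = mkD (if x = 'o' then some ((i : Int) + 3) else a)
              (if x = ',' then some ((i : Int)) else b)
              (if x = 'p' then some ((i : Int) + 4) else c) := by
      by_cases h1 : x = 'o' <;> by_cases h2 : x = ',' <;> by_cases h3 : x = 'p' <;>
        simp_all [insert_mkD_o, insert_mkD_c, insert_mkD_p]
    rw [step, ih (i + 1), oUp_cons x xs 'o' i 3 a, oUp_cons x xs ',' i 0 b,
        oUp_cons x xs 'p' i 4 c]
    norm_num

theorem single_isPrefixOf_cons (ch x : Char) (xs : List Char) :
    ([ch].isPrefixOf (x :: xs)) = (ch == x) := by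
  show (ch == x && List.isPrefixOf [] xs) = (ch == x)
  simp

theorem single_isPrefixOf (ch : Char) (l : List Char) :
    ([ch].isPrefixOf l = true) ↔ l.head? = some ch := by
  cases l with
  | nil => simp
  | cons x xs =>
    simp only [single_isPrefixOf_cons, List.head?_cons, beq_iff_eq, Option.some.injEq]
    exact eq_comm

set_option maxRecDepth 8192 in
theorem lastIdx_take_succ (cs : List Char) (ch : Char) :
    ∀ k : Nat, lastIdx (cs.take (k + 1)) ch =
      if cs[k]? = some ch then some k else lastIdx (cs.take k) ch := by
  induction cs with
  | nil => intro k; simp [lastIdx_nil]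
  | cons x xs ih =>
    intro k
    cases k with
    | zero =>
      by_cases hx : x = ch <;> simp [lastIdx_nil, lastIdx_cons, hx]
    | succ k =>
      simp only [List.take_succ_cons, List.getElem?_cons_succ]
      rcases h : xs[k]? with _ | y
      · simp [lastIdx_cons, ih k, h]
      · by_cases hy : y = ch
        · subst hy
          simp [lastIdx_cons, ih k, h]
        · have hne : (some y = some ch) = False := by simp [hy]
          simp [lastIdx_cons, ih k, h, hne]

set_option maxRecDepth 8192 in
theorem go_single (cs : List Char) (ch : Char) :
    ∀ k : Nat, PySem.Chars.rfind.go cs [ch] k =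
      (match lastIdx (cs.take (k + 1)) ch with | none => (-1 : Int) | some j => (j : Int)) := by
  intro k
  induction k with
  | zero =>
    rw [PySem.Chars.rfind.go]
    rcases cs with _ | ⟨x, xs⟩
    · simp [lastIdx_nil]
    · by_cases hx : ch = x
      · simp [lastIdx_cons, lastIdx_nil, hx]
      · have h1 : (ch == x) = false := by simp [hx]
        have h2 : ¬ (x = ch) := fun h => hx h.symm
        simp [single_isPrefixOf_cons, lastIdx_cons, lastIdx_nil, h1, h2]
  | succ k ih =>
    rw [PySem.Chars.rfind.go]
    rw [lastIdx_take_succ cs ch (k + 1)]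
    by_cases h : cs[k + 1]? = some ch
    · have hpre : [ch].isPrefixOf (cs.drop (k + 1)) = true := by
        rw [single_isPrefixOf, List.head?_drop]; exact h
      simp [hpre, h]
    · have hpre : [ch].isPrefixOf (cs.drop (k + 1)) = false := by
        rw [Bool.eq_false_iff]
        intro hc
        apply h
        rw [← List.head?_drop]
        exact (single_isPrefixOf ch _).mp hc
      simp [hpre, h, ih]

/-- `rfind` of a single character is its last index (or -1). -/
theorem rfind_single (cs : List Char) (ch : Char) :
    PySem.Chars.rfind cs [ch] =
      (match lastIdx cs ch with | none => (-1 : Int) | some j => (j : Int)) := by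
  rw [PySem.Chars.rfind, go_single cs ch cs.length,
      List.take_of_length_le (by omega : cs.length ≤ cs.length + 1)]

theorem oUp_eq_rfind (cs : List Char) (ch : Char) (off : Int) :
    oUp cs ch 0 off none =
      (if PySem.Chars.rfind cs [ch] ≠ -1 then some (PySem.Chars.rfind cs [ch] + off) else none) := by
  rw [rfind_single]
  unfold oUp
  rcases lastIdx cs ch with _ | j <;> simp

-- ===== VERDICT (by name: the statement is the Claim_ definition above) =====
theorem search_position_spec : Claim_equal_search_position := by
  intro line _
  unfold Spec_search_position search_position search_position_alt
  have h0 : ((((PySem.Dict.empty.insert "auroc_start" (none : Option Int)).insert "auroc_end" none).insert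
        "auprc_start" none).insert "auprc_end" none) = mkD none none none := by decide
  have hf := foldA line.toList 0 none none none
  have ho := oUp_eq_rfind line.toList 'o' 3
  have hc := oUp_eq_rfind line.toList ',' 0
  have hp := oUp_eq_rfind line.toList 'p' 4
  simp only [add_zero] at hc
  simp only [h0, hf, PySem.Str.rfind_eq]
  simp [mkD, ho, hc, hp]
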